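-- pv_equiv track=rewrite | github.com/pvdabholker/HomeHero-Synap5e | backend/app/services/geolocation.py | parse_goa_pincode_location
-- ===== SOURCE A (Python) =====
-- def parse_goa_pincode_location(pincode: str, city: str = "") -> str:
--     if not pincode or not pincode.isdigit() or len(pincode) != 6:
--         return city or ""
--
--     # Goa pincode mapping
--     pincode_regions = {
--         (403001, 403199): "Panaji, North Goa, Goa, India",
--         (403200, 403299): "Mapusa, North Goa, Goa, India",
--         (403300, 403399): "Bicholim, Pernem, North Goa, Goa, India",
--         (403400, 403499): "Vasco da Gama, Mormugao, South Goa, Goa, India",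
--         (403500, 403599): "Margao, Salcete, South Goa, Goa, India",
--         (403600, 403699): "Quepem, Canacona, South Goa, Goa, India",
--         (403700, 403799): "Ponda, Dharbandora, Goa, India",
--         (403800, 403899): "Sanguem, Curchorem, South Goa, Goa, India",
--         (403900, 403999): "Other Regions, Goa, India",
--     }
--
--     pincode_int = int(pincode)
--     for (start, end), region in pincode_regions.items():
--         if start <= pincode_int <= end:
--             return f"{city}, {region}" if city else region
--
--     return f"{city}, {pincode}, Goa, India" if city else f"{pincode}, Goa, India"
-- ===== SOURCE B (Python) =====
-- _REGIONS = (
--     "Panaji, North Goa, Goa, India",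
--     "Panaji, North Goa, Goa, India",
--     "Mapusa, North Goa, Goa, India",
--     "Bicholim, Pernem, North Goa, Goa, India",
--     "Vasco da Gama, Mormugao, South Goa, Goa, India",
--     "Margao, Salcete, South Goa, Goa, India",
--     "Quepem, Canacona, South Goa, Goa, India",
--     "Ponda, Dharbandora, Goa, India",
--     "Sanguem, Curchorem, South Goa, Goa, India",
--     "Other Regions, Goa, India",
-- )
--
--
-- def parse_goa_pincode_location(pincode: str, city: str = "") -> str:
--     if len(pincode) != 6 or not pincode.isdigit():
--         return city or ""
--     p = int(pincode)
--     if 403001 <= p <= 403999: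
--         region = _REGIONS[(p - 403000) // 100]
--         return f"{city}, {region}" if city else region
--     return f"{city}, {pincode}, Goa, India" if city else f"{pincode}, Goa, India"
-- ===== Notes on version B (the rewrite author's own statement) =====
-- stated objective: alternative
-- what changed: Replaces the 9-entry range-dict linear scan with a bounds check plus direct arithmetic indexing ((p-403000)//100) into a 10-element region table (Panaji doubled for its two hundreds-buckets).
import Mathlib
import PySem

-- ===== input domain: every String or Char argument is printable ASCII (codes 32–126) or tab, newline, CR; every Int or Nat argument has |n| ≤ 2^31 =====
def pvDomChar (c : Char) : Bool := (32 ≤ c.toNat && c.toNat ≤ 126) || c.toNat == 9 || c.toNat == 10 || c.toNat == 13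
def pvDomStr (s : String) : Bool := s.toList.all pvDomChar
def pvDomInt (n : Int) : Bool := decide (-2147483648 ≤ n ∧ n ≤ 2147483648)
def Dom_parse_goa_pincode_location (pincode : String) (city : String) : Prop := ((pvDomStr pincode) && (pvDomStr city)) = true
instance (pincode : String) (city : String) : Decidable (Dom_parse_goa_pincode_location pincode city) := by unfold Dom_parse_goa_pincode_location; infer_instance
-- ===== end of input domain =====

-- B replaces A's linear scan over a dict of 9 pincode ranges by direct arithmetic indexing into a 10-entry region table (objective: alternative).

-- ===== PORT A =====
-- the dict pincode_regions as an association list, in insertion order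
def pvRegionsA : List ((Int × Int) × String) :=
  [((403001, 403199), "Panaji, North Goa, Goa, India"),
   ((403200, 403299), "Mapusa, North Goa, Goa, India"),
   ((403300, 403399), "Bicholim, Pernem, North Goa, Goa, India"),
   ((403400, 403499), "Vasco da Gama, Mormugao, South Goa, Goa, India"),
   ((403500, 403599), "Margao, Salcete, South Goa, Goa, India"),
   ((403600, 403699), "Quepem, Canacona, South Goa, Goa, India"),
   ((403700, 403799), "Ponda, Dharbandora, Goa, India"),
   ((403800, 403899), "Sanguem, Curchorem, South Goa, Goa, India"),
   ((403900, 403999), "Other Regions, Goa, India")]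

-- the 'for (start, end), region in pincode_regions.items()' loop, with the post-loop return as the base case
def pvLoopA (p : Int) (city : String) (pincode : String) : List ((Int × Int) × String) → String
  | [] =>
      if city ≠ "" then city ++ ", " ++ pincode ++ ", Goa, India"
      else pincode ++ ", Goa, India"
  | ((s, e), r) :: rest =>
      if s ≤ p ∧ p ≤ e then (if city ≠ "" then city ++ ", " ++ r else r)
      else pvLoopA p city pincode rest

def parse_goa_pincode_location (pincode : String) (city : String) : String :=
  if pincode = "" ∨ ¬ PySem.Str.strIsdigit pincode ∨ PySem.Str.len pincode ≠ 6 then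
    (if city ≠ "" then city else "")
  else
    -- int(pincode): cannot raise here (six ASCII digits), so the ValueError branch is unreachable
    pvLoopA ((PySem.Int.ofStr? pincode).getD 0) city pincode pvRegionsA

-- ===== PORT B =====
-- the module-level _REGIONS table of Source B
def pvRegionsB : List String :=
  ["Panaji, North Goa, Goa, India",
   "Panaji, North Goa, Goa, India",
   "Mapusa, North Goa, Goa, India",
   "Bicholim, Pernem, North Goa, Goa, India",
   "Vasco da Gama, Mormugao, South Goa, Goa, India",
   "Margao, Salcete, South Goa, Goa, India",
   "Quepem, Canacona, South Goa, Goa, India",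
   "Ponda, Dharbandora, Goa, India",
   "Sanguem, Curchorem, South Goa, Goa, India",
   "Other Regions, Goa, India"]

-- body of Source B after the validity guard ( _REGIONS[…] is always in range there, so the default "" is unreachable)
def pvTailB (p : Int) (city : String) (pincode : String) : String :=
  if 403001 ≤ p ∧ p ≤ 403999 then
    let region := PySem.List.pyGetD pvRegionsB (PySem.Int.floordiv (p - 403000) 100) ""
    if city ≠ "" then city ++ ", " ++ region else region
  else
    if city ≠ "" then city ++ ", " ++ pincode ++ ", Goa, India"
    else pincode ++ ", Goa, India"

def parse_goa_pincode_location_alt (pincode : String) (city : String) : String :=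
  if PySem.Str.len pincode ≠ 6 ∨ ¬ PySem.Str.strIsdigit pincode then
    (if city ≠ "" then city else "")
  else
    pvTailB ((PySem.Int.ofStr? pincode).getD 0) city pincode

-- ===== PRECONDITION & SPEC =====
def Spec_parse_goa_pincode_location (pincode : String) (city : String) (out : String) : Prop := out = parse_goa_pincode_location_alt pincode city
instance (pincode : String) (city : String) (out : String) : Decidable (Spec_parse_goa_pincode_location pincode city out) := by unfold Spec_parse_goa_pincode_location; infer_instance

-- ===== CLAIM (what is proved, stated in full; the proofs are below) =====
def Claim_equal_parse_goa_pincode_location : Prop := ∀ (pincode : String) (city : String), Dom_parse_goa_pincode_location pincode city → Spec_parse_goa_pincode_location pincode city (parse_goa_pincode_location pincode city)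

-- ===== LEMMAS AND PROOFS =====

-- A's range scan agrees with B's arithmetic table lookup for EVERY integer p
lemma pvTail_eq (p : Int) (city pincode : String) :
    pvLoopA p city pincode pvRegionsA = pvTailB p city pincode := by
  simp only [pvRegionsA, pvLoopA, pvTailB,
    PySem.Int.floordiv_eq_ediv_of_pos (a := p - 403000) (show (0:Int) < 100 by norm_num)]
  by_cases hin : 403001 ≤ p ∧ p ≤ 403999
  · rw [if_pos hin]
    by_cases h1 : 403001 ≤ p ∧ p ≤ 403199
    · rw [if_pos h1]
      rcases (show (p - 403000) / 100 = 0 ∨ (p - 403000) / 100 = 1 by omega) with h | h <;> rw [h] <;> rfl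
    · rw [if_neg h1]
      by_cases h2 : 403200 ≤ p ∧ p ≤ 403299
      · rw [if_pos h2, show (p - 403000) / 100 = 2 by omega]; rfl
      · rw [if_neg h2]
        by_cases h3 : 403300 ≤ p ∧ p ≤ 403399
        · rw [if_pos h3, show (p - 403000) / 100 = 3 by omega]; rfl
        · rw [if_neg h3]
          by_cases h4 : 403400 ≤ p ∧ p ≤ 403499
          · rw [if_pos h4, show (p - 403000) / 100 = 4 by omega]; rfl
          · rw [if_neg h4]
            by_cases h5 : 403500 ≤ p ∧ p ≤ 403599
            · rw [if_pos h5, show (p - 403000) / 100 = 5 by omega]; rfl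
            · rw [if_neg h5]
              by_cases h6 : 403600 ≤ p ∧ p ≤ 403699
              · rw [if_pos h6, show (p - 403000) / 100 = 6 by omega]; rfl
              · rw [if_neg h6]
                by_cases h7 : 403700 ≤ p ∧ p ≤ 403799
                · rw [if_pos h7, show (p - 403000) / 100 = 7 by omega]; rfl
                · rw [if_neg h7]
                  by_cases h8 : 403800 ≤ p ∧ p ≤ 403899
                  · rw [if_pos h8, show (p - 403000) / 100 = 8 by omega]; rfl
                  · rw [if_neg h8, if_pos (show 403900 ≤ p ∧ p ≤ 403999 by omega),
                        show (p - 403000) / 100 = 9 by omega]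
                    rfl
  · rw [if_neg hin,
      if_neg (show ¬(403001 ≤ p ∧ p ≤ 403199) by omega),
      if_neg (show ¬(403200 ≤ p ∧ p ≤ 403299) by omega),
      if_neg (show ¬(403300 ≤ p ∧ p ≤ 403399) by omega),
      if_neg (show ¬(403400 ≤ p ∧ p ≤ 403499) by omega),
      if_neg (show ¬(403500 ≤ p ∧ p ≤ 403599) by omega),
      if_neg (show ¬(403600 ≤ p ∧ p ≤ 403699) by omega),
      if_neg (show ¬(403700 ≤ p ∧ p ≤ 403799) by omega),
      if_neg (show ¬(403800 ≤ p ∧ p ≤ 403899) by omega),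
      if_neg (show ¬(403900 ≤ p ∧ p ≤ 403999) by omega)]

-- the two validity guards accept/reject the same strings ('' has length 0, never 6)
lemma pvGuard_iff (pincode : String) :
    (pincode = "" ∨ ¬ PySem.Str.strIsdigit pincode ∨ PySem.Str.len pincode ≠ 6) ↔
    (PySem.Str.len pincode ≠ 6 ∨ ¬ PySem.Str.strIsdigit pincode) := by
  constructor
  · rintro (h | h | h)
    · left; subst h; decide
    · right; exact h
    · left; exact h
  · rintro (h | h)
    · right; right; exact h
    · right; left; exact h

-- ===== VERDICT (by name: the statement is the Claim_ definition above) =====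
theorem parse_goa_pincode_location_spec : Claim_equal_parse_goa_pincode_location := by
  intro pincode city _
  unfold Spec_parse_goa_pincode_location parse_goa_pincode_location parse_goa_pincode_location_alt
  rw [if_congr (pvGuard_iff pincode) rfl rfl]
  by_cases hg : PySem.Str.len pincode ≠ 6 ∨ ¬ PySem.Str.strIsdigit pincode
  · rw [if_pos hg, if_pos hg]
  · rw [if_neg hg, if_neg hg]; exact pvTail_eq _ city pincode
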